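-- pv_equiv track=rewrite | github.com/jagath-sajjan/BugginHell | server/code_workspace.py | parse_pasted_files
-- ===== SOURCE A (Python) =====
-- DEFAULT_CODEBASE = {
--     "cart.py": '''def calculate_total(items):
--     total = 0
--     for i in range(len(items) - 1):
--         total += items[i]["price"]
--     return total
-- ''',
--     "tests/test_cart.py": '''from cart import calculate_total
--
-- def test_calculate_total_counts_all_items():
--     items = [{"price": 10}, {"price": 20}, {"price": 30}]
--     assert calculate_total(items) == 60
-- ''',
--     "README.md": "# Demo buggy cart codebase\n",
-- }
--
-- def parse_pasted_files(raw_text: str):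
--     """
--     Format:
--     === cart.py ===
--     code here
--
--     === tests/test_cart.py ===
--     code here
--     """
--     files = {}
--     current_name = None
--     current_lines = []
--
--     for line in raw_text.splitlines():
--         if line.strip().startswith("===") and line.strip().endswith("==="):
--             if current_name:
--                 files[current_name] = "\n".join(current_lines).strip() + "\n"
--
--             current_name = line.strip().strip("=").strip()
--             current_lines = []
--         else:
--             current_lines.append(line)
--
--     if current_name:
--         files[current_name] = "\n".join(current_lines).strip() + "\n"
--
--     return files or DEFAULT_CODEBASE
-- ===== SOURCE B (Python) =====
-- DEFAULT_CODEBASE = {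
--     "cart.py": '''def calculate_total(items):
--     total = 0
--     for i in range(len(items) - 1):
--         total += items[i]["price"]
--     return total
-- ''',
--     "tests/test_cart.py": '''from cart import calculate_total
--
-- def test_calculate_total_counts_all_items():
--     items = [{"price": 10}, {"price": 20}, {"price": 30}]
--     assert calculate_total(items) == 60
-- ''',
--     "README.md": "# Demo buggy cart codebase\n",
-- }
--
--
-- def _is_header(line):
--     s = line.strip()
--     return s.startswith("===") and s.endswith("===")
--
--
-- def parse_pasted_files(raw_text: str):
--     lines = raw_text.splitlines()
--     n = len(lines)
--     files = {}
--     i = 0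
--     # discard everything before the first header line
--     while i < n and not _is_header(lines[i]):
--         i += 1
--     # section-at-a-time: each header owns the lines up to the next header
--     while i < n:
--         name = lines[i].strip().strip("=").strip()
--         j = i + 1
--         while j < n and not _is_header(lines[j]):
--             j += 1
--         if name:
--             files[name] = "\n".join(lines[i + 1:j]).strip() + "\n"
--         i = j
--     return files or DEFAULT_CODEBASE
-- ===== Notes on version B (the rewrite author's own statement) =====
-- stated objective: alternative
-- what changed: B replaces A's single fold carrying (current_name, current_lines, pending-flush) state with a two-pointer section scan: skip the preamble, then for each header find the next header's index and slice the body lines directly, inserting each completed section at once.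
import Mathlib
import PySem

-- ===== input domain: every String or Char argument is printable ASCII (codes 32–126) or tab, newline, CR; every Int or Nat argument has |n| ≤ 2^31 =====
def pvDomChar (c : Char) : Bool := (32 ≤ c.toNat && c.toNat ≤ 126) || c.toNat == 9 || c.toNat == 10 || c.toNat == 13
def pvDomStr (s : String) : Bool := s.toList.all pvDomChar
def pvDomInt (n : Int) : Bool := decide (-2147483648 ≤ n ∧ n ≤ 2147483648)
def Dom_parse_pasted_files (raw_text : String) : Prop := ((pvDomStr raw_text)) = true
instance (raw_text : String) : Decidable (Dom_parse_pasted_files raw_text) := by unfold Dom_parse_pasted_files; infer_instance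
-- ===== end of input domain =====

-- B replaces A's single fold carrying (current_name, current_lines) running state with a
-- section-at-a-time scan (skip preamble, then slice each header's body up to the next header);
-- objective: alternative decomposition, same O(n) cost.

-- shared helpers (both Pythons compute these exact expressions)
def pvDefaultCodebase : List (String × String) :=
  [("cart.py", "def calculate_total(items):\n    total = 0\n    for i in range(len(items) - 1):\n        total += items[i][\"price\"]\n    return total\n"),
   ("tests/test_cart.py", "from cart import calculate_total\n\ndef test_calculate_total_counts_all_items():\n    items = [{\"price\": 10}, {\"price\": 20}, {\"price\": 30}]\n    assert calculate_total(items) == 60\n"),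
   ("README.md", "# Demo buggy cart codebase\n")]

-- line.strip().startswith("===") and line.strip().endswith("===")
def pvIsHeader (line : String) : Bool :=
  PySem.Str.startswith (PySem.Str.strip line) "===" && PySem.Str.endswith (PySem.Str.strip line) "==="

-- line.strip().strip("=").strip()
def pvName (line : String) : String :=
  PySem.Str.strip (PySem.Str.stripChars (PySem.Str.strip line) "=")

-- "\n".join(lines).strip() + "\n"
def pvContent (lines : List String) : String :=
  PySem.Str.strip (PySem.Str.join "\n" lines) ++ "\n"

-- files[current_name] = content, guarded by current_name's truthiness ("" plays Python's None/"")
def pvFlush (files : PySem.Dict String String) (name : String) (acc : List String) :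
    PySem.Dict String String :=
  if name ≠ "" then files.insert name (pvContent acc) else files

-- ===== PORT A =====
def pvStepA (st : PySem.Dict String String × String × List String) (line : String) :
    PySem.Dict String String × String × List String :=
  if pvIsHeader line then
    (pvFlush st.1 st.2.1 st.2.2, pvName line, [])
  else
    (st.1, st.2.1, st.2.2 ++ [line])

def parse_pasted_files (raw_text : String) : List (String × String) :=
  let st := (PySem.Str.splitlines raw_text).foldl pvStepA (PySem.Dict.empty, "", [])
  let files := pvFlush st.1 st.2.1 st.2.2
  if files.items = [] then pvDefaultCodebase else files.items

-- ===== PORT B =====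
-- section scan: the head is a header line; its body is every line up to the next header
def pvParseSections : List String → PySem.Dict String String → PySem.Dict String String
  | [], files => files
  | h :: t, files =>
      pvParseSections (t.dropWhile (fun l => !pvIsHeader l))
        (pvFlush files (pvName h) (t.takeWhile (fun l => !pvIsHeader l)))
termination_by ls _ => ls.length
decreasing_by
  exact Nat.lt_succ_of_le (List.length_dropWhile_le _ _)

def parse_pasted_files_alt (raw_text : String) : List (String × String) :=
  let lines := PySem.Str.splitlines raw_text
  let files := pvParseSections (lines.dropWhile (fun l => !pvIsHeader l)) PySem.Dict.empty
  if files.items = [] then pvDefaultCodebase else files.items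

-- ===== PRECONDITION & SPEC =====
def Spec_parse_pasted_files (raw_text : String) (out : List (String × String)) : Prop := out = parse_pasted_files_alt raw_text
instance (raw_text : String) (out : List (String × String)) : Decidable (Spec_parse_pasted_files raw_text out) := by unfold Spec_parse_pasted_files; infer_instance

-- ===== CLAIM (what is proved, stated in full; the proofs are below) =====
def Claim_equal_parse_pasted_files : Prop := ∀ (raw_text : String), Dom_parse_pasted_files raw_text → Spec_parse_pasted_files raw_text (parse_pasted_files raw_text)

-- ===== LEMMAS AND PROOFS =====

-- A's fold, flushed at the end, equals B's section scan started after the unscanned no-header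
-- prefix, with that prefix folded into the pending section's accumulator.
theorem pvFold_eq_sections (ls : List String) (files : PySem.Dict String String)
    (name : String) (acc : List String) :
    pvFlush (ls.foldl pvStepA (files, name, acc)).1 (ls.foldl pvStepA (files, name, acc)).2.1
        (ls.foldl pvStepA (files, name, acc)).2.2 =
      pvParseSections (ls.dropWhile (fun l => !pvIsHeader l))
        (pvFlush files name (acc ++ ls.takeWhile (fun l => !pvIsHeader l))) := by
  induction ls generalizing files name acc with
  | nil => simp [pvParseSections]
  | cons l ls ih =>
      by_cases h : pvIsHeader l = true
      · rw [List.foldl_cons]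
        simp only [pvStepA, h, if_pos]
        rw [ih]
        rw [List.dropWhile_cons_of_neg (by simp [h]), List.takeWhile_cons_of_neg (by simp [h])]
        rw [pvParseSections]
        simp
      · rw [List.foldl_cons]
        simp only [pvStepA, h, if_neg, Bool.false_eq_true, not_false_iff]
        rw [ih]
        rw [List.dropWhile_cons_of_pos (by simp [h]), List.takeWhile_cons_of_pos (by simp [h])]
        simp

-- ===== VERDICT (by name: the statement is the Claim_ definition above) =====
theorem parse_pasted_files_spec : Claim_equal_parse_pasted_files := by
  intro raw_text _
  unfold Spec_parse_pasted_files parse_pasted_files parse_pasted_files_alt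
  have h := pvFold_eq_sections (PySem.Str.splitlines raw_text) PySem.Dict.empty "" []
  have h2 : pvFlush PySem.Dict.empty ""
      ([] ++ (PySem.Str.splitlines raw_text).takeWhile (fun l => !pvIsHeader l)) =
      PySem.Dict.empty := by simp [pvFlush]
  rw [h2] at h
  simp only [h]
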